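-- pv_equiv track=rewrite | github.com/Ace1928/eidosian_forge | archive_forge/src/archive_forge/func_materialize_lines.py | materialize_lines
-- ===== SOURCE A (Python) =====
-- from typing import Any, Dict, List, Set, Tuple, Union
--
-- def materialize_lines(lines: List[str], indentation: int) -> str:
--     output = ''
--     new_line_with_indent = '\n' + ' ' * indentation
--     for i, line in enumerate(lines):
--         if i != 0:
--             output += new_line_with_indent
--         output += line.replace('\n', new_line_with_indent)
--     return output
-- ===== SOURCE B (Python) =====
-- def materialize_lines(lines, indentation):
--     return '\n'.join(lines).replace('\n', '\n' + ' ' * indentation)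
-- ===== Notes on version B (the rewrite author's own statement) =====
-- stated objective: simpler
-- what changed: Replaces the indexed accumulation loop (per-line separator insertion plus per-line replace) with a single expression: join all lines with '\n', then one global replace of '\n' by the indented separator.
import Mathlib
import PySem

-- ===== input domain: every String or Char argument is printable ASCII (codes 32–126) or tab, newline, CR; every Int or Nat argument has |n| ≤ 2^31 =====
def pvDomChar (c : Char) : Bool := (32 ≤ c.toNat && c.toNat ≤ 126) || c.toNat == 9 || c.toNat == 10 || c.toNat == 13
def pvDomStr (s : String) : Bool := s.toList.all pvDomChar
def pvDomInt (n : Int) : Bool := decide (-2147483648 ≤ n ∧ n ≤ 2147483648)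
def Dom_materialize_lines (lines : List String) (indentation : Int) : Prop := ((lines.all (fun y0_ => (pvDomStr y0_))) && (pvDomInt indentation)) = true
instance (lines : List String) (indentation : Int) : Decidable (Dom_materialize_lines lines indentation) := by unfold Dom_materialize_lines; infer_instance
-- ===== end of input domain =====

-- B replaces A's indexed accumulation loop by a single join-then-global-replace expression (simpler; return value only, no mutation involved).

-- ===== PORT A =====
-- A's loop, transliterated on the character-list side ('+=' is list append; str.replace is PySem.Chars.replace, exact)
def materialize_lines (lines : List String) (indentation : Int) : String :=
  let new_line_with_indent : List Char := '\n' :: PySem.List.pyRepeat [' '] indentation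
  String.ofList <|
    (PySem.List.enumerate lines 0).foldl
      (fun (output : List Char) p =>
        let output := if p.1 ≠ 0 then output ++ new_line_with_indent else output
        output ++ PySem.Chars.replace p.2.toList ['\n'] new_line_with_indent)
      []

-- ===== PORT B =====
-- B: '\n'.join(lines).replace('\n', '\n' + ' ' * indentation), via PySem.Chars.join / PySem.Chars.replace
def materialize_lines_alt (lines : List String) (indentation : Int) : String :=
  let sep : List Char := '\n' :: PySem.List.pyRepeat [' '] indentation
  String.ofList
    (PySem.Chars.replace (PySem.Chars.join ['\n'] (lines.map String.toList)) ['\n'] sep)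

-- ===== PRECONDITION & SPEC =====
def Spec_materialize_lines (lines : List String) (indentation : Int) (out : String) : Prop := out = materialize_lines_alt lines indentation
instance (lines : List String) (indentation : Int) (out : String) : Decidable (Spec_materialize_lines lines indentation out) := by unfold Spec_materialize_lines; infer_instance

-- ===== CLAIM (what is proved, stated in full; the proofs are below) =====
def Claim_equal_materialize_lines : Prop := ∀ (lines : List String) (indentation : Int), Dom_materialize_lines lines indentation → Spec_materialize_lines lines indentation (materialize_lines lines indentation)

-- ===== LEMMAS AND PROOFS =====

-- single-character replace is a flatMap over the characters
theorem replace_go_single (c : Char) (new : List Char) :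
    ∀ (fuel : Nat) (l acc : List Char), l.length ≤ fuel →
      PySem.Chars.replace.go [c] new fuel l acc
        = acc.reverse ++ l.flatMap (fun x => if x = c then new else [x]) := by
  intro fuel
  induction fuel with
  | zero =>
    intro l acc h
    have : l = [] := List.eq_nil_of_length_eq_zero (Nat.le_zero.mp h)
    subst this
    simp [PySem.Chars.replace.go]
  | succ f ih =>
    intro l acc h
    cases l with
    | nil => simp [PySem.Chars.replace.go]
    | cons x t =>
      simp only [PySem.Chars.replace.go]
      by_cases hx : x = c
      · subst hx
        have hp : List.isPrefixOf [x] (x :: t) = true := by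
          simp [List.isPrefixOf]
        simp only [hp, if_pos, List.length_cons, List.length_nil, List.drop_succ_cons,
          List.drop_zero]
        rw [ih t _ (by simpa using h)]
        simp [List.flatMap_cons]
      · have hp : List.isPrefixOf [c] (x :: t) = false := by
          simp [List.isPrefixOf]
          exact fun hc => (hx hc.symm).elim
        simp only [hp]
        rw [if_neg (by simp), ih t _ (by simpa using h)]
        simp [List.flatMap_cons, hx]

theorem replace_single (c : Char) (new l : List Char) :
    PySem.Chars.replace l [c] new = l.flatMap (fun x => if x = c then new else [x]) := by
  unfold PySem.Chars.replace
  simp only [List.isEmpty_cons, Bool.false_eq_true, if_false]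
  exact replace_go_single c new l.length l [] (le_refl _)

-- B's value: replace distributed over the join
theorem alt_flat (sep : List Char) (parts : List (List Char)) :
    (PySem.Chars.join ['\n'] parts).flatMap (fun x => if x = '\n' then sep else [x])
      = match parts with
        | [] => []
        | p :: ps =>
            p.flatMap (fun x => if x = '\n' then sep else [x])
              ++ ps.flatMap (fun q => sep ++ q.flatMap (fun x => if x = '\n' then sep else [x])) := by
  cases parts with
  | nil => simp [PySem.Chars.join, List.intercalate]
  | cons p ps =>
    induction ps generalizing p with
    | nil => simp [PySem.Chars.join, List.intercalate]
    | cons q qs ih =>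
      have hintc : PySem.Chars.join ['\n'] (p :: q :: qs)
          = p ++ '\n' :: PySem.Chars.join ['\n'] (q :: qs) := by
        simp [PySem.Chars.join, List.intercalate, List.intersperse]
      rw [hintc]
      simp only [List.flatMap_append, List.flatMap_cons]
      rw [ih q]
      simp

-- A's loop value for the tail (every index there is ≠ 0)
theorem foldA_tail (sep : List Char) :
    ∀ (ls : List String) (s : Int) (acc : List Char), 1 ≤ s →
      (PySem.List.enumerate ls s).foldl
          (fun (output : List Char) p =>
            (if p.1 ≠ 0 then output ++ sep else output)
              ++ PySem.Chars.replace p.2.toList ['\n'] sep) acc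
        = acc ++ ls.flatMap
            (fun l => sep ++ l.toList.flatMap (fun x => if x = '\n' then sep else [x])) := by
  intro ls
  induction ls with
  | nil => intro s acc _; simp [PySem.List.enumerate_nil]
  | cons l t ih =>
    intro s acc hs
    rw [PySem.List.enumerate_cons, List.foldl_cons]
    rw [ih (s + 1) _ (by omega)]
    have hns : s ≠ 0 := by omega
    simp [hns, replace_single, List.flatMap_cons]

-- ===== VERDICT (by name: the statement is the Claim_ definition above) =====
theorem materialize_lines_spec : Claim_equal_materialize_lines := by
  intro lines indentation _
  unfold Spec_materialize_lines
  show String.ofList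
      ((PySem.List.enumerate lines 0).foldl
        (fun (output : List Char) p =>
          (if p.1 ≠ 0 then output ++ ('\n' :: PySem.List.pyRepeat [' '] indentation) else output)
            ++ PySem.Chars.replace p.2.toList ['\n'] ('\n' :: PySem.List.pyRepeat [' '] indentation)) [])
    = String.ofList (PySem.Chars.replace
        (PySem.Chars.join ['\n'] (lines.map String.toList)) ['\n']
        ('\n' :: PySem.List.pyRepeat [' '] indentation))
  generalize ('\n' :: PySem.List.pyRepeat [' '] indentation : List Char) = sep
  congr 1
  rw [replace_single]
  cases lines with
  | nil => simp [PySem.List.enumerate_nil, PySem.Chars.join, List.intercalate]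
  | cons l t =>
    rw [List.map_cons, alt_flat]
    rw [PySem.List.enumerate_cons, List.foldl_cons]
    have h01 : (0 : Int) + 1 = 1 := by norm_num
    rw [h01, foldA_tail sep t 1 _ (by norm_num)]
    simp [replace_single, List.flatMap_map]
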